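-- pv_equiv track=rewrite | github.com/solvin-ai/solvin | agentic/backend/old/modules.old/gradle_parser.py | extract_top_level_error_and_cause
-- ===== SOURCE A (Python) =====
-- def extract_top_level_error_and_cause(stack_trace):
--     """
--     Extracts the top-level error message and the first "Caused by:" message from a Gradle stack trace.
--
--     This function looks for the marker line "* Exception is:" and then takes the next non-empty line
--     as the top-level error message. It also scans the entire stack trace for the first line that starts
--     with "Caused by:".
--
--     Args:
--         stack_trace (str): The complete Gradle stack trace.
--
--     Returns:
--         tuple:
--           (top_error_message, cause_message)
--           - top_error_message (str): The extracted top-level error message, or None if not found.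
--           - cause_message (str): The first "Caused by:" line found, or None.
--     """
--     lines = stack_trace.splitlines()
--     top_error_message = None
--     cause_message = None
--
--     # Search for the top-level error message from the "* Exception is:" marker.
--     for i, line in enumerate(lines):
--         if "* Exception is:" in line:
--             j = i + 1
--             while j < len(lines):
--                 candidate = lines[j].strip()
--                 if candidate:
--                     top_error_message = candidate
--                     break
--                 j += 1
--             if top_error_message:
--                 break
--
--     # Find the first line that starts with "Caused by:".
--     for line in lines:
--         stripped_line = line.strip()
--         if stripped_line.startswith("Caused by:"):
--             cause_message = stripped_line
--             break
--
--     return top_error_message, cause_message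
-- ===== SOURCE B (Python) =====
-- def extract_top_level_error_and_cause(stack_trace):
--     top_error_message = None
--     cause_message = None
--     seeking_error = False
--     for line in stack_trace.splitlines():
--         stripped = line.strip()
--         if top_error_message is None:
--             if seeking_error and stripped:
--                 top_error_message = stripped
--             elif "* Exception is:" in line:
--                 seeking_error = True
--         if cause_message is None and stripped.startswith("Caused by:"):
--             cause_message = stripped
--     return top_error_message, cause_message
-- ===== Notes on version B (the rewrite author's own statement) =====
-- stated objective: simpler
-- what changed: Replaces A's two separate scans (an enumerate loop with a nested index-based while over the tail, plus a second full scan for the cause) by one single pass that maintains a seeking_error flag and fills both results in the same loop.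
import Mathlib
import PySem

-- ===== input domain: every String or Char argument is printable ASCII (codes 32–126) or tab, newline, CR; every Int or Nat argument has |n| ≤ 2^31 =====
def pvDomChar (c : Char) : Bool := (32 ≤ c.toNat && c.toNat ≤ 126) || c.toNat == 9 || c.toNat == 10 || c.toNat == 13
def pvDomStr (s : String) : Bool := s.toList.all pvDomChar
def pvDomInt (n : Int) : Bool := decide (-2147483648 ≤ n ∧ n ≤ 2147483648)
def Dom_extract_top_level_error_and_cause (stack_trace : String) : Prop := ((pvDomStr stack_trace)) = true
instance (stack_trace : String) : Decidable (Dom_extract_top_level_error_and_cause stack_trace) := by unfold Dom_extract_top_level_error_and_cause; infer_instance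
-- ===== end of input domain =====

-- B merges A's two scans (marker loop with nested index-walking while, plus a second full
-- scan for the cause) into one single pass with a seeking flag; objective: simpler.

-- ===== PORT A =====
-- A's inner `while j < len(lines)` walking lines[j].strip(): here recursion on the tail after the marker.
def pvFindNonEmpty : List String → Option String
  | [] => none
  | l :: ls =>
    let candidate := PySem.Str.strip l
    if candidate ≠ "" then some candidate else pvFindNonEmpty ls

-- A's first loop: `for i, line in enumerate(lines)`; `if top_error_message: break` is the
-- some-branch (candidate is non-empty, hence truthy), the none-branch continues the outer loop.
def pvLoopTopA : List String → Option String
  | [] => none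
  | line :: rest =>
    if PySem.Str.isIn "* Exception is:" line then
      match pvFindNonEmpty rest with
      | some c => some c
      | none => pvLoopTopA rest
    else pvLoopTopA rest

-- A's second loop: first stripped line starting with "Caused by:".
def pvLoopCauseA : List String → Option String
  | [] => none
  | line :: rest =>
    let s := PySem.Str.strip line
    if PySem.Str.startswith s "Caused by:" then some s else pvLoopCauseA rest

def extract_top_level_error_and_cause (stack_trace : String) : Option String × Option String :=
  let lines := PySem.Str.splitlines stack_trace
  (pvLoopTopA lines, pvLoopCauseA lines)

-- ===== PORT B =====
-- Source B's single pass: state (top_error_message, cause_message, seeking_error).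
def pvLoopB : List String → Option String → Option String → Bool → Option String × Option String
  | [], top, cause, _ => (top, cause)
  | line :: rest, top, cause, seeking =>
    let stripped := PySem.Str.strip line
    let ts : Option String × Bool :=
      if top = none then
        if seeking = true ∧ stripped ≠ "" then (some stripped, seeking)
        else if PySem.Str.isIn "* Exception is:" line then (top, true)
        else (top, seeking)
      else (top, seeking)
    let cause' := if cause = none ∧ PySem.Str.startswith stripped "Caused by:" = true then some stripped else cause
    pvLoopB rest ts.1 cause' ts.2

def extract_top_level_error_and_cause_alt (stack_trace : String) : Option String × Option String :=
  pvLoopB (PySem.Str.splitlines stack_trace) none none false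

-- ===== PRECONDITION & SPEC =====
def Spec_extract_top_level_error_and_cause (stack_trace : String) (out : Option String × Option String) : Prop := out = extract_top_level_error_and_cause_alt stack_trace
instance (stack_trace : String) (out : Option String × Option String) : Decidable (Spec_extract_top_level_error_and_cause stack_trace out) := by unfold Spec_extract_top_level_error_and_cause; infer_instance

-- ===== CLAIM (what is proved, stated in full; the proofs are below) =====
def Claim_equal_extract_top_level_error_and_cause : Prop := ∀ (stack_trace : String), Dom_extract_top_level_error_and_cause stack_trace → Spec_extract_top_level_error_and_cause stack_trace (extract_top_level_error_and_cause stack_trace)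

-- ===== LEMMAS AND PROOFS =====

-- B never overwrites an already-found cause; before that it tracks A's cause scan.
theorem pvLoopB_snd (lines : List String) :
    ∀ (top cause : Option String) (seeking : Bool),
      (pvLoopB lines top cause seeking).2
        = (match cause with | some c => some c | none => pvLoopCauseA lines) := by
  induction lines with
  | nil => intro top cause seeking; cases cause <;> simp [pvLoopB, pvLoopCauseA]
  | cons line rest ih =>
    intro top cause seeking
    simp only [pvLoopB, pvLoopCauseA]
    cases cause with
    | some c => simp [ih]
    | none =>
      by_cases h : PySem.Chars.startswith (PySem.Chars.strip line.toList)
          ['C', 'a', 'u', 's', 'e', 'd', ' ', 'b', 'y', ':'] = true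
      · simp [h, ih]
      · simp [h, ih]

-- B never overwrites an already-found top error.
theorem pvLoopB_fst_some (lines : List String) :
    ∀ (t : String) (cause : Option String) (seeking : Bool),
      (pvLoopB lines (some t) cause seeking).1 = some t := by
  induction lines with
  | nil => intro t cause seeking; simp [pvLoopB]
  | cons line rest ih => intro t cause seeking; simp [pvLoopB, ih]

-- In the seeking state B's top result is the first non-empty stripped line.
theorem pvLoopB_fst_seek (lines : List String) :
    ∀ (cause : Option String),
      (pvLoopB lines none cause true).1 = pvFindNonEmpty lines := by
  induction lines with
  | nil => intro cause; simp [pvLoopB, pvFindNonEmpty]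
  | cons line rest ih =>
    intro cause
    simp only [pvLoopB, pvFindNonEmpty]
    by_cases h : PySem.Str.strip line = ""
    · by_cases hm : PySem.Chars.isIn
          ['*', ' ', 'E', 'x', 'c', 'e', 'p', 't', 'i', 'o', 'n', ' ', 'i', 's', ':'] line.toList = true <;>
        simp [h, hm, ih]
    · simp [h, pvLoopB_fst_some]

-- If no later line is non-empty, A's outer loop also finds nothing.
theorem pvLoopTopA_of_findNone (lines : List String)
    (h : pvFindNonEmpty lines = none) : pvLoopTopA lines = none := by
  induction lines with
  | nil => simp [pvLoopTopA]
  | cons line rest ih =>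
    simp only [pvFindNonEmpty] at h
    by_cases hs : PySem.Str.strip line = ""
    · simp only [hs, ne_eq, not_true_eq_false, if_false] at h
      simp [pvLoopTopA, h, ih h]
    · simp [hs] at h

-- Main loop invariant: B's top component tracks A's first loop.
theorem pvLoopB_fst_main (lines : List String) :
    ∀ (cause : Option String),
      (pvLoopB lines none cause false).1 = pvLoopTopA lines := by
  induction lines with
  | nil => intro cause; simp [pvLoopB, pvLoopTopA]
  | cons line rest ih =>
    intro cause
    simp only [pvLoopB, pvLoopTopA]
    by_cases hm : PySem.Chars.isIn
        ['*', ' ', 'E', 'x', 'c', 'e', 'p', 't', 'i', 'o', 'n', ' ', 'i', 's', ':'] line.toList = true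
    · cases hfe : pvFindNonEmpty rest with
      | some c => simp [hm, pvLoopB_fst_seek, hfe]
      | none => simp [hm, pvLoopB_fst_seek, hfe, pvLoopTopA_of_findNone rest hfe]
    · simp [hm, ih]

-- ===== VERDICT (by name: the statement is the Claim_ definition above) =====
theorem extract_top_level_error_and_cause_spec : Claim_equal_extract_top_level_error_and_cause := by
  intro stack_trace _
  unfold Spec_extract_top_level_error_and_cause extract_top_level_error_and_cause
    extract_top_level_error_and_cause_alt
  refine Prod.ext ?_ ?_
  · simp [pvLoopB_fst_main]
  · simp [pvLoopB_snd]
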